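-- pv_equiv track=rewrite | github.com/lolney/RecipeTransformations | recipetransform/nlp/parse_ingredient.py | splitPrepPhraseList
-- ===== SOURCE A (Python) =====
-- def splitPrepPhraseList(pos_str,prepended):
-- 	commaitr = (i for i,v in enumerate(pos_str) if v == (',',','))
-- 	commapos = next(commaitr,None)
--
-- 	if commapos is not None:
-- 		prepList = []
-- 		prepDescList = []
-- 		commas = [-1,commapos]
-- 		while commas[1] is not None:
-- 			[prep,desc] = splitPrepPhrase(pos_str[commas[0]+1:commas[1]],prepended)
-- 			prepList.append(prep)
-- 			prepDescList.append(desc)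
-- 			commas = [commas[1],next(commaitr,None)]
--
-- 		[prep,desc] = splitPrepPhrase(pos_str[commas[0]+1:],prepended)
-- 		prepList.append(prep)
-- 		prepDescList.append(desc)
-- 		return [prepList,prepDescList]
--
-- 	[prep,desc] = splitPrepPhrase(pos_str,prepended)
-- 	return [[prep],[desc]]
--
-- def splitPrepPhrase(pos_prep,prepended):
-- 	parendesc = ''
-- 	if pos_prep[0][0] == "and":
-- 		pos_prep = pos_prep[1:]
-- 	if prepended:
-- 		if pos_prep[-1][1] == 'PARENPHRASE':
-- 			parendesc = ' ' + pos_prep[-1][0]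
-- 			del pos_prep[-1]
-- 		prep = pos_prep[-1][0]
-- 		desc = " ".join([x[0] for x in pos_prep[:-1]]) + parendesc
-- 	else:
-- 		if pos_prep[0][1] == 'PARENPHRASE':
-- 			parendesc = ' ' + pos_prep[0][0]
-- 			del pos_prep[0]
-- 		prep = pos_prep[0][0]
-- 		desc = " ".join([x[0] for x in pos_prep[1:]]) + parendesc
-- 	return [prep,desc]
-- ===== SOURCE B (Python) =====
-- def splitPrepPhraseList(pos_str, prepended):
--     # Phase 1: segment the token list on (',', ',') delimiters.
--     segments = [[]]
--     for tok in pos_str: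
--         if tok == (',', ','):
--             segments.append([])
--         else:
--             segments[-1].append(tok)
--     # Phase 2: one uniform pass parsing every segment.
--     pairs = [_parsePrep(seg, prepended) for seg in segments]
--     return [[p for p, _ in pairs], [d for _, d in pairs]]
--
--
-- def _parsePrep(seg, prepended):
--     if seg[0][0] == 'and':
--         seg = seg[1:]
--     toks = seg[::-1] if prepended else seg
--     paren = ''
--     if toks[0][1] == 'PARENPHRASE':
--         paren = ' ' + toks[0][0]
--         toks = toks[1:]
--     prep = toks[0][0]
--     rest = [w for w, _ in toks[1:]]
--     if prepended:
--         rest.reverse()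
--     return prep, ' '.join(rest) + paren
-- ===== Notes on version B (the rewrite author's own statement) =====
-- stated objective: simpler
-- what changed: B splits the POS list into comma-delimited segments in one accumulator pass and then parses every segment with one uniform pass (a single reversal-based prep parser), replacing A's generator/while loop over comma indices with slicing and A's two mirrored parser branches.
import Mathlib
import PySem

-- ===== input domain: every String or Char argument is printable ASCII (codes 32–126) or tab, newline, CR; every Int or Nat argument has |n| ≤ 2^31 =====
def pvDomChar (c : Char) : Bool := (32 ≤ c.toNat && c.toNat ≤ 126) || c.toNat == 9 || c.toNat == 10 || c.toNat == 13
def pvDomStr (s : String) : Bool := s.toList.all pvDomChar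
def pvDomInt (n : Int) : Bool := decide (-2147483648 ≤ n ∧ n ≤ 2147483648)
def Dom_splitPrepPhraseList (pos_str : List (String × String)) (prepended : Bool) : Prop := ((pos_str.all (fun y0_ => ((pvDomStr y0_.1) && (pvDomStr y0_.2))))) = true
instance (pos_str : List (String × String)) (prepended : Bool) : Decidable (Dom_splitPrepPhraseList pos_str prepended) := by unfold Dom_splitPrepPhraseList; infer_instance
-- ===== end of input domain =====

-- B replaces A's generator/while loop + slicing with a segment-then-map decomposition (simpler);
-- equivalence is about the RETURN value only: in its no-comma case A may delete a PARENPHRASE token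
-- from the caller's pos_str in place, which B never does.

-- ===== PORT A =====
-- splitPrepPhrase: returns none exactly where the Python raises IndexError (empty list indexed).
def pvPhraseA (pos_prep : List (String × String)) (prepended : Bool) : Option (String × String) :=
  match pos_prep with
  | [] => none   -- pos_prep[0][0] : IndexError
  | h :: t =>
    let pp := if h.1 = "and" then t else pos_prep
    if prepended then
      match pp.getLast? with
      | none => none   -- pos_prep[-1][1] : IndexError
      | some last =>
        let pd := if last.2 = "PARENPHRASE" then (" " ++ last.1, pp.dropLast) else ("", pp)
        match pd.2.getLast? with
        | none => none   -- pos_prep[-1][0] after del : IndexError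
        | some lst => some (lst.1, PySem.Str.join " " (pd.2.dropLast.map (·.1)) ++ pd.1)
    else
      match pp.head? with
      | none => none   -- pos_prep[0][1] : IndexError
      | some first =>
        let pd := if first.2 = "PARENPHRASE" then (" " ++ first.1, pp.tail) else ("", pp)
        match pd.2.head? with
        | none => none   -- pos_prep[0][0] after del : IndexError
        | some fst => some (fst.1, PySem.Str.join " " (pd.2.tail.map (·.1)) ++ pd.1)

-- the while loop: prev comma position (starts at -1), remaining comma positions from the generator
def pvLoopA (pos_str : List (String × String)) (prepended : Bool) :
    Int → List Int → List String → List String → List (List String)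
  | prev, c :: rest, pl, dl =>
    match pvPhraseA (PySem.List.slice pos_str (some (prev + 1)) (some c)) prepended with
    | none => []   -- IndexError propagates: unreachable under Pre_
    | some (p, d) => pvLoopA pos_str prepended c rest (pl ++ [p]) (dl ++ [d])
  | prev, [], pl, dl =>
    match pvPhraseA (PySem.List.slice pos_str (some (prev + 1)) none) prepended with
    | none => []
    | some (p, d) => [pl ++ [p], dl ++ [d]]

def splitPrepPhraseList (pos_str : List (String × String)) (prepended : Bool) : List (List String) :=
  let commas := ((PySem.List.enumerate pos_str 0).filter (fun iv => iv.2 = (",", ","))).map (·.1)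
  match commas with
  | [] =>
    match pvPhraseA pos_str prepended with
    | none => []   -- IndexError: unreachable under Pre_
    | some (p, d) => [[p], [d]]
  | c :: rest => pvLoopA pos_str prepended (-1) (c :: rest) [] []

-- ===== PORT B =====
-- _parsePrep from Source B; ("", "") where the Python would raise IndexError (outside Pre_).
def pvParseB (seg : List (String × String)) (prepended : Bool) : String × String :=
  let seg1 := match seg with
    | (w, _) :: rest => if w = "and" then rest else seg
    | [] => seg
  let toks := if prepended then seg1.reverse else seg1
  let pt := match toks with
    | t0 :: rest => if t0.2 = "PARENPHRASE" then (" " ++ t0.1, rest) else ("", toks)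
    | [] => ("", toks)
  match pt.2 with
  | t0 :: rest =>
    let restW := rest.map (·.1)
    let restW := if prepended then restW.reverse else restW
    (t0.1, PySem.Str.join " " restW ++ pt.1)
  | [] => ("", "")

def splitPrepPhraseList_alt (pos_str : List (String × String)) (prepended : Bool) : List (List String) :=
  -- phase 1: segment on (',', ',') with a (finished segments, current segment) accumulator
  let acc := pos_str.foldl
    (fun (acc : List (List (String × String)) × List (String × String)) tok =>
      if tok = (",", ",") then (acc.1 ++ [acc.2], []) else (acc.1, acc.2 ++ [tok]))
    ([], [])
  let segments := acc.1 ++ [acc.2]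
  -- phase 2: one uniform pass
  let pairs := segments.map (fun seg => pvParseB seg prepended)
  [pairs.map (·.1), pairs.map (·.2)]

-- ===== PRECONDITION & SPEC =====
-- the comma-delimited segments of the input (what A's slices and B's accumulator both produce)
def pySegs : List (String × String) → List (List (String × String))
  | [] => [[]]
  | t :: rest =>
    if t = (",", ",") then [] :: pySegs rest
    else match pySegs rest with
      | s :: ss => (t :: s) :: ss
      | [] => [[t]]

-- what remains of a segment after stripping a leading "and" and the optional PARENPHRASE token
def pvStrip (seg : List (String × String)) (prepended : Bool) : List (String × String) :=
  let pp := match seg with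
    | (w, _) :: rest => if w = "and" then rest else seg
    | [] => []
  if prepended then
    match pp.getLast? with
    | some l => if l.2 = "PARENPHRASE" then pp.dropLast else pp
    | none => []
  else
    match pp with
    | f :: rest => if f.2 = "PARENPHRASE" then rest else pp
    | [] => []

-- Pre_ excludes exactly the inputs where A raises IndexError: some comma-delimited segment is
-- empty, or becomes empty after the "and"/PARENPHRASE stripping, so splitPrepPhrase indexes [].
def Pre_splitPrepPhraseList (pos_str : List (String × String)) (prepended : Bool) : Prop :=
  ∀ seg ∈ pySegs pos_str, pvStrip seg prepended ≠ []
instance (pos_str : List (String × String)) (prepended : Bool) : Decidable (Pre_splitPrepPhraseList pos_str prepended) := by unfold Pre_splitPrepPhraseList; infer_instance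

def pvWitness_splitPrepPhraseList : (List (String × String)) × Bool :=
  ([("chopped", "VBD"), ("in", "IN"), (",", ","), ("with", "IN"), ("care", "NN")], false)

def Spec_splitPrepPhraseList (pos_str : List (String × String)) (prepended : Bool) (out : List (List String)) : Prop := out = splitPrepPhraseList_alt pos_str prepended
instance (pos_str : List (String × String)) (prepended : Bool) (out : List (List String)) : Decidable (Spec_splitPrepPhraseList pos_str prepended out) := by unfold Spec_splitPrepPhraseList; infer_instance

-- ===== CLAIM (what is proved, stated in full; the proofs are below) =====
def Claim_equal_splitPrepPhraseList : Prop := ∀ (pos_str : List (String × String)) (prepended : Bool), Dom_splitPrepPhraseList pos_str prepended → Pre_splitPrepPhraseList pos_str prepended → Spec_splitPrepPhraseList pos_str prepended (splitPrepPhraseList pos_str prepended)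

-- ===== LEMMAS AND PROOFS =====

theorem pySegs_ne_nil (l : List (String × String)) : pySegs l ≠ [] := by
  induction l with
  | nil => simp [pySegs]
  | cons t rest ih =>
    simp only [pySegs]
    split
    · simp
    · cases h : pySegs rest <;> simp

theorem phrase_eq_true (seg : List (String × String)) (h : pvStrip seg true ≠ []) :
    pvPhraseA seg true = some (pvParseB seg true) := by
  match hseg : seg with
  | [] => simp [pvStrip] at h
  | (w, tg) :: t =>
    rw [pvStrip] at h
    rw [pvPhraseA, pvParseB]
    simp only [if_true] at h ⊢
    generalize hpp : (if w = "and" then t else (w, tg) :: t) = pp at h ⊢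
    cases hr : pp.reverse with
    | nil =>
      rw [List.reverse_eq_nil_iff] at hr
      subst hr; simp at h
    | cons r0 rtl =>
      have hpp2 : pp = rtl.reverse ++ [r0] := by
        rw [← List.reverse_reverse pp, hr]; simp
      subst hpp2
      rw [List.getLast?_concat, List.dropLast_concat] at h ⊢
      by_cases hpar : r0.2 = "PARENPHRASE"
      · simp [hpar, List.getLast?_reverse, List.dropLast_reverse, List.map_reverse] at h ⊢
        cases rtl with
        | nil => exact absurd rfl h
        | cons q0 qtl => simp
      · simp [hpar, List.getLast?_reverse, List.map_reverse] at h ⊢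

theorem phrase_eq_false (seg : List (String × String)) (h : pvStrip seg false ≠ []) :
    pvPhraseA seg false = some (pvParseB seg false) := by
  match hseg : seg with
  | [] => simp [pvStrip] at h
  | (w, tg) :: t =>
    rw [pvStrip] at h
    rw [pvPhraseA, pvParseB]
    simp only [if_false, Bool.false_eq_true] at h ⊢
    generalize hpp : (if w = "and" then t else (w, tg) :: t) = pp at h ⊢
    cases pp with
    | nil => simp at h
    | cons f rest =>
      by_cases hpar : f.2 = "PARENPHRASE"
      · simp [hpar] at h ⊢
        cases rest with
        | nil => exact absurd rfl h
        | cons q0 qtl => simp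
      · simp [hpar] at h ⊢

theorem phrase_eq (seg : List (String × String)) (b : Bool) (h : pvStrip seg b ≠ []) :
    pvPhraseA seg b = some (pvParseB seg b) := by
  cases b
  · exact phrase_eq_false seg h
  · exact phrase_eq_true seg h

-- comma positions, structurally
def pvIdxs : List (String × String) → List Int
  | [] => []
  | t :: rest => (if t = (",", ",") then [(0 : Int)] else []) ++ (pvIdxs rest).map (· + 1)

theorem enumFilter_eq (l : List (String × String)) : ∀ (s : Int),
    ((PySem.List.enumerate l s).filter (fun iv => iv.2 = (",", ","))).map (·.1)
      = (pvIdxs l).map (· + s) := by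
  induction l with
  | nil => intro s; simp [PySem.List.enumerate_nil, pvIdxs]
  | cons t rest ih =>
    intro s
    rw [PySem.List.enumerate_cons]
    by_cases hc : t = (",", ",")
    · rw [List.filter_cons_of_pos (by simp [hc]), List.map_cons, ih (s+1)]
      simp only [pvIdxs, if_pos hc, List.singleton_append, List.map_cons, List.map_map]
      congr 1
      · simp
      · congr 1; funext x; simp; ring
    · rw [List.filter_cons_of_neg (by simp [hc]), ih (s+1)]
      simp only [pvIdxs, if_neg hc, List.nil_append, List.map_map]
      congr 1; funext x; simp; ring

theorem pvIdxs_nil_no_comma (l : List (String × String)) (h : pvIdxs l = []) :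
    (",", ",") ∉ l := by
  induction l with
  | nil => simp
  | cons t rest ih =>
    simp only [pvIdxs, List.append_eq_nil_iff, List.map_eq_nil_iff] at h
    rcases h with ⟨h1, h2⟩
    simp only [List.mem_cons, not_or]
    constructor
    · intro hc; rw [if_pos hc.symm] at h1; simp at h1
    · exact ih h2

theorem pySegs_no_comma (l : List (String × String)) (h : (",", ",") ∉ l) :
    pySegs l = [l] := by
  induction l with
  | nil => rfl
  | cons t rest ih =>
    simp only [List.mem_cons, not_or] at h
    simp only [pySegs, if_neg (Ne.symm h.1), ih h.2]

theorem pySegs_append (pre rest : List (String × String)) (h : (",", ",") ∉ pre) :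
    pySegs (pre ++ (",", ",") :: rest) = pre :: pySegs rest := by
  induction pre with
  | nil => simp [pySegs]
  | cons t p ih =>
    simp only [List.mem_cons, not_or] at h
    simp only [List.cons_append, pySegs, if_neg (Ne.symm h.1), ih h.2]

theorem pvIdxs_cons_decomp (l : List (String × String)) : ∀ (c : Int) (cs : List Int),
    pvIdxs l = c :: cs →
    ∃ pre rest, l = pre ++ (",", ",") :: rest ∧ (",", ",") ∉ pre ∧ c = (pre.length : Int) ∧
      cs = (pvIdxs rest).map (· + ((pre.length : Int) + 1)) := by
  induction l with
  | nil => intro c cs h; simp [pvIdxs] at h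
  | cons t rest ih =>
    intro c cs h
    by_cases hc : t = (",", ",")
    · refine ⟨[], rest, by simp [hc], by simp, ?_, ?_⟩
      · simp only [pvIdxs, if_pos hc, List.singleton_append, List.cons.injEq] at h
        simp [h.1.symm]
      · simp only [pvIdxs, if_pos hc, List.singleton_append, List.cons.injEq] at h
        simp only [List.length_nil, Nat.cast_zero, zero_add, h.2.symm]
    · simp only [pvIdxs, if_neg hc, List.nil_append] at h
      obtain ⟨c', cs', hrest, rfl, rfl⟩ : ∃ c' cs', pvIdxs rest = c' :: cs' ∧ c = c' + 1 ∧ cs = cs'.map (· + 1) := by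
        cases hr : pvIdxs rest with
        | nil => rw [hr] at h; simp at h
        | cons a b => rw [hr] at h; simp at h; exact ⟨a, b, rfl, h.1.symm, h.2.symm⟩
      obtain ⟨pre, rest', rfl, hnp, rfl, rfl⟩ := ih _ _ hrest
      refine ⟨t :: pre, rest', rfl, ?_, ?_, ?_⟩
      · simp only [List.mem_cons, not_or]
        exact ⟨Ne.symm hc, hnp⟩
      · simp only [List.length_cons]; push_cast; omega
      · rw [List.map_map]; congr 1; funext x; simp; ring

theorem loopA_eq (b : Bool) : ∀ (n : Nat) (s : List (String × String)), s.length ≤ n →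
    ∀ (k : Nat) (l : List (String × String)) (pl dl : List String), l.drop k = s →
    (∀ seg ∈ pySegs s, pvStrip seg b ≠ []) →
    pvLoopA l b ((k : Int) - 1) ((pvIdxs s).map (· + (k : Int))) pl dl
      = [pl ++ (pySegs s).map (fun seg => (pvParseB seg b).1),
         dl ++ (pySegs s).map (fun seg => (pvParseB seg b).2)] := by
  intro n
  induction n with
  | zero =>
    intro s hlen k l pl dl hdrop hok
    have hs : s = [] := List.eq_nil_of_length_eq_zero (Nat.le_zero.mp hlen)
    subst hs
    have := hok [] (by simp [pySegs])
    simp [pvStrip] at this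
  | succ n ih =>
    intro s hlen k l pl dl hdrop hok
    cases hidx : pvIdxs s with
    | nil =>
      have hsegs := pySegs_no_comma s (pvIdxs_nil_no_comma s hidx)
      rw [List.map_nil, pvLoopA]
      have h1 : (k : Int) - 1 + 1 = ((k : Nat) : Int) := by ring
      rw [h1, PySem.List.slice_from_natCast, hdrop,
        phrase_eq s b (hok s (by rw [hsegs]; simp)), hsegs]
      simp
    | cons c cs =>
      obtain ⟨pre, rest, rfl, hnp, rfl, rfl⟩ := pvIdxs_cons_decomp _ _ _ hidx
      have hsegs := pySegs_append pre rest hnp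
      rw [List.map_cons, pvLoopA]
      have h1 : (k : Int) - 1 + 1 = ((k : Nat) : Int) := by ring
      have h2 : (pre.length : Int) + (k : Int) = ((k : Nat) : Int) + ((pre.length : Nat) : Int) := by
        ring
      rcases hpb : pvParseB pre b with ⟨p, d⟩
      have hpa : pvPhraseA pre b = some (p, d) := by
        rw [phrase_eq pre b (hok pre (by rw [hsegs]; simp)), hpb]
      rw [h1, h2, PySem.List.slice_natCast_add, hdrop, List.take_left, hpa]
      have hdrop2 : l.drop (k + pre.length + 1) = rest := by
        have : l.drop (k + pre.length + 1) = (l.drop k).drop (pre.length + 1) := by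
          rw [List.drop_drop]; ring_nf
        rw [this, hdrop]
        rw [show pre ++ (",", ",") :: rest = (pre ++ [(",", ",")]) ++ rest by simp]
        rw [show pre.length + 1 = (pre ++ [(",", ",")]).length by simp]
        exact List.drop_left
      have hok2 : ∀ seg ∈ pySegs rest, pvStrip seg b ≠ [] := by
        intro seg hseg
        exact hok seg (by rw [hsegs]; exact List.mem_cons_of_mem _ hseg)
      have hlen2 : rest.length ≤ n := by
        have := hlen
        simp only [List.length_append, List.length_cons] at this
        omega
      have hrec := ih rest hlen2 (k + pre.length + 1) l (pl ++ [p]) (dl ++ [d]) hdrop2 hok2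
      have h3 : ((k : Int) + (pre.length : Int)) = (((k + pre.length + 1 : Nat)) : Int) - 1 := by
        push_cast; ring
      have h4 : (List.map (fun x => x + (k : Int))
          ((pvIdxs rest).map (· + ((pre.length : Int) + 1))))
          = (pvIdxs rest).map (· + ((k + pre.length + 1 : Nat) : Int)) := by
        rw [List.map_map]; congr 1; funext x; push_cast; simp; ring
      simp only []
      rw [h3, h4, hrec, hsegs]
      simp [hpb]

theorem foldB (l : List (String × String)) : ∀ (done : List (List (String × String)))
    (cur : List (String × String)) (s : List (String × String)) (ss : List (List (String × String))),
    pySegs l = s :: ss →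
    (List.foldl (fun (acc : List (List (String × String)) × List (String × String)) tok =>
        if tok = (",", ",") then (acc.1 ++ [acc.2], []) else (acc.1, acc.2 ++ [tok])) (done, cur) l).1
      ++ [(List.foldl (fun (acc : List (List (String × String)) × List (String × String)) tok =>
        if tok = (",", ",") then (acc.1 ++ [acc.2], []) else (acc.1, acc.2 ++ [tok])) (done, cur) l).2]
      = done ++ (cur ++ s) :: ss := by
  induction l with
  | nil =>
    intro done cur s ss hs
    simp only [pySegs, List.cons.injEq] at hs
    rcases hs with ⟨rfl, rfl⟩
    simp
  | cons t rest ih =>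
    intro done cur s ss hs
    obtain ⟨s', ss', hrest⟩ : ∃ a b, pySegs rest = a :: b := by
      cases hr : pySegs rest with
      | nil => exact absurd hr (pySegs_ne_nil rest)
      | cons a b => exact ⟨a, b, rfl⟩
    rw [pySegs, hrest] at hs
    by_cases hc : t = (",", ",")
    · rw [if_pos hc] at hs
      simp only [List.cons.injEq] at hs
      rcases hs with ⟨rfl, rfl⟩
      rw [List.foldl_cons, if_pos hc, ih (done ++ [cur]) [] s' ss' hrest]
      simp
    · rw [if_neg hc] at hs
      simp only [List.cons.injEq] at hs
      rcases hs with ⟨rfl, rfl⟩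
      rw [List.foldl_cons, if_neg hc, ih done (cur ++ [t]) s' ss' hrest]
      simp

theorem alt_eq (l : List (String × String)) (b : Bool) :
    splitPrepPhraseList_alt l b
      = [(pySegs l).map (fun seg => (pvParseB seg b).1),
         (pySegs l).map (fun seg => (pvParseB seg b).2)] := by
  obtain ⟨s, ss, hs⟩ : ∃ a c, pySegs l = a :: c := by
    cases hr : pySegs l with
    | nil => exact absurd hr (pySegs_ne_nil l)
    | cons a c => exact ⟨a, c, rfl⟩
  have hf := foldB l [] [] s ss hs
  simp only [List.nil_append] at hf
  simp only [splitPrepPhraseList_alt, List.map_map]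
  rw [hf, hs]
  simp

-- ===== VERDICT (by name: the statement is the Claim_ definition above) =====
theorem splitPrepPhraseList_spec : Claim_equal_splitPrepPhraseList := by
  intro l b _ hpre
  unfold Pre_splitPrepPhraseList at hpre
  unfold Spec_splitPrepPhraseList
  rw [alt_eq l b, splitPrepPhraseList]
  have hz : ((PySem.List.enumerate l 0).filter (fun iv => iv.2 = (",", ","))).map (·.1)
      = pvIdxs l := by
    rw [enumFilter_eq l 0]; simp
  rw [hz]
  cases hidx : pvIdxs l with
  | nil =>
    have hsegs := pySegs_no_comma l (pvIdxs_nil_no_comma l hidx)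
    rcases hpb : pvParseB l b with ⟨p, d⟩
    have hpa : pvPhraseA l b = some (p, d) := by
      rw [phrase_eq l b (hpre l (by rw [hsegs]; simp)), hpb]
    rw [hpa, hsegs]
    simp [hpb]
  | cons c cs =>
    have hrec := loopA_eq b l.length l le_rfl 0 l [] [] (by simp) hpre
    rw [hidx] at hrec
    simp only [Nat.cast_zero, zero_sub, add_zero] at hrec
    have hmap : (c :: cs).map (fun x : Int => x) = c :: cs := List.map_id _
    rw [hmap] at hrec
    show pvLoopA l b (-1) (c :: cs) [] [] = _
    rw [hrec]
    simp
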